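-- pv_equiv track=rewrite | github.com/BTejesh27/algo | linklayer.py | char_stuff
-- ===== SOURCE A (Python) =====
-- def char_stuff(d):
--     f, e = 'F', 'E'
--     s = f
--     for c in d:
--         if c == f or c == e:
--             s += e
--         s += c
--     return s + f
-- ===== SOURCE B (Python) =====
-- def char_stuff(d):
--     f, e = 'F', 'E'
--     return f + d.replace(e, e + e).replace(f, e + f) + f
-- ===== Notes on version B (the rewrite author's own statement) =====
-- stated objective: idiomatic
-- what changed: Replaced the per-character branch-and-append loop with two bulk str.replace substitutions (E->EE first, then F->EF) surrounded by the flags.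
import Mathlib
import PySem

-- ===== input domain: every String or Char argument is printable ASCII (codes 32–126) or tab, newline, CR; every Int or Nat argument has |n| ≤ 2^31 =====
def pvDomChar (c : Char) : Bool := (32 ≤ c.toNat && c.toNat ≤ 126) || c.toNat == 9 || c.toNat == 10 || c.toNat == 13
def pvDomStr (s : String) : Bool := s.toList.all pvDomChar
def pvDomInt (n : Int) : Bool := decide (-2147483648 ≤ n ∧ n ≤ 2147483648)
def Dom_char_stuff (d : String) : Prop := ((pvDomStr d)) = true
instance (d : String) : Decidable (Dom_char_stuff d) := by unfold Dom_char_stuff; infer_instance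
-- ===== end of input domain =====

-- B replaces A's per-character branch-and-append loop with two bulk replace substitutions (idiomatic; same cost).

-- ===== PORT A =====
def char_stuff (d : String) : String :=
  (d.toList.foldl (fun s c => (if c = 'F' ∨ c = 'E' then s.push 'E' else s).push c) "F") ++ "F"

-- ===== PORT B =====
def char_stuff_alt (d : String) : String :=
  "F" ++ PySem.Str.replace (PySem.Str.replace d "E" "EE") "F" "EF" ++ "F"

-- ===== PRECONDITION & SPEC =====
def Spec_char_stuff (d : String) (out : String) : Prop := out = char_stuff_alt d
instance (d : String) (out : String) : Decidable (Spec_char_stuff d out) := by unfold Spec_char_stuff; infer_instance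

-- ===== CLAIM (what is proved, stated in full; the proofs are below) =====
def Claim_equal_char_stuff : Prop := ∀ (d : String), Dom_char_stuff d → Spec_char_stuff d (char_stuff d)

-- ===== LEMMAS AND PROOFS =====

-- replace with a one-character pattern acts independently on each character
theorem replace_go_single (o : Char) (n : List Char) :
    ∀ (l : List Char) (fuel : Nat) (acc : List Char), l.length ≤ fuel →
      PySem.Chars.replace.go [o] n fuel l acc
        = acc.reverse ++ l.flatMap (fun c => if c = o then n else [c]) := by
  intro l
  induction l with
  | nil =>
      intro fuel acc _
      cases fuel <;> simp [PySem.Chars.replace.go]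
  | cons c t ih =>
      intro fuel acc h
      cases fuel with
      | zero => simp at h
      | succ fuel =>
        rw [PySem.Chars.replace.go]
        by_cases hc : c = o
        · subst hc
          simp [List.isPrefixOf, ih fuel (n.reverse ++ acc) (by simpa using h)]
        · have hp : List.isPrefixOf [o] (c :: t) = false := by
            simp [List.isPrefixOf]; exact fun e => (hc e.symm).elim
          simp [hp, ih fuel (c :: acc) (by simpa using h), hc]

theorem replace_single (s : List Char) (o : Char) (n : List Char) :
    PySem.Chars.replace s [o] n = s.flatMap (fun c => if c = o then n else [c]) := by
  simpa using replace_go_single o n s s.length [] le_rfl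

theorem two_replace (l : List Char) :
    PySem.Chars.replace (PySem.Chars.replace l ['E'] ['E', 'E']) ['F'] ['E', 'F']
      = l.flatMap (fun c => if c = 'F' ∨ c = 'E' then ['E', c] else [c]) := by
  rw [replace_single, replace_single]
  induction l with
  | nil => simp
  | cons c t ih =>
    by_cases hE : c = 'E'
    · simp [hE, ih]
    · by_cases hF : c = 'F' <;> simp [hE, hF, ih]

theorem foldl_char_stuff (l : List Char) (s : String) :
    (l.foldl (fun s c => (if c = 'F' ∨ c = 'E' then s.push 'E' else s).push c) s).toList
      = s.toList ++ l.flatMap (fun c => if c = 'F' ∨ c = 'E' then ['E', c] else [c]) := by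
  induction l generalizing s with
  | nil => simp
  | cons c t ih => by_cases h : c = 'F' ∨ c = 'E' <;> simp [ih, h]

-- ===== VERDICT (by name: the statement is the Claim_ definition above) =====
theorem char_stuff_spec : Claim_equal_char_stuff := by
  intro d _
  unfold Spec_char_stuff char_stuff char_stuff_alt
  apply String.toList_inj.mp
  have hE : "E".toList = ['E'] := rfl
  have hEE : "EE".toList = ['E', 'E'] := rfl
  have hF : "F".toList = ['F'] := rfl
  have hEF : "EF".toList = ['E', 'F'] := rfl
  simp only [String.toList_append, foldl_char_stuff,
    PySem.Str.replace, String.toList_ofList, hE, hEE, hF, hEF, two_replace]
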